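-- pv_equiv track=rewrite | github.com/psymoney/PS-group | sangyeop/binary_search/2805.py | answer
-- ===== SOURCE A (Python) =====
-- def answer(T: list, M: int) -> int:
--     l, r = 1, 1000000000
--
--     while l <= r:
--         m = l + (r - l) // 2
--
--         woods = 0
--         for t in T:
--             if t > m:
--                 woods += t - m
--
--         if woods < M:
--             r = m - 1
--         else:
--             l = m + 1
--
--     return r
-- ===== SOURCE B (Python) =====
-- def answer(T: list, M: int) -> int:
--     # Sort descending once and test each prefix with a closed-form threshold
--     # instead of binary-searching the height.
--     if M <= 0:
--         return 1000000000
--     s = sorted(T, reverse=True)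
--     best = None
--     prefix = 0
--     for j, t in enumerate(s, 1):
--         prefix += t
--         h = (prefix - M) // j
--         if h < t and (j == len(s) or s[j] <= h):
--             if best is None or h > best:
--                 best = h
--     if best is None or best < 1:
--         return 0
--     return min(best, 1000000000)
-- ===== Notes on version B (the rewrite author's own statement) =====
-- stated objective: faster
-- what changed: Replaces the 30-iteration binary search over cut heights (each with a full scan of T) by one descending sort with a prefix-sum pass that computes the optimal height in closed form floor((prefix_j - M)/j) for each band and clamps to [0, 10^9].
import Mathlib
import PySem

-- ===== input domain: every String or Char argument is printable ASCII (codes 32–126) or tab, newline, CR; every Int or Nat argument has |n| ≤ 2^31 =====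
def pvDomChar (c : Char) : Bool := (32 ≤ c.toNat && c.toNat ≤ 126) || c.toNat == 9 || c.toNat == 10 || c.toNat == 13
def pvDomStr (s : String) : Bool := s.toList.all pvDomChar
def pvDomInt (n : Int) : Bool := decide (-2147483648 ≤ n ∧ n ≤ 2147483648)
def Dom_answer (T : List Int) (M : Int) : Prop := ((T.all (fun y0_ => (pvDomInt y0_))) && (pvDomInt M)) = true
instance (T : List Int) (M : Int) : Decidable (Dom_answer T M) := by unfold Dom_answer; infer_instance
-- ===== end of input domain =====

-- B replaces A's binary search over heights by one descending sort + prefix-sum pass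
-- with a closed-form per-band threshold; equal return value on every input (no mutation).

-- ===== PORT A =====
-- literal port of A's while-loop binary search; the inner for-loop is the foldl
def answerLoop (T : List Int) (M l r : Int) : Int :=
  if h : l ≤ r then
    let m := l + PySem.Int.floordiv (r - l) 2
    let woods := T.foldl (fun acc t => if m < t then acc + (t - m) else acc) 0
    if woods < M then answerLoop T M l (m - 1) else answerLoop T M (m + 1) r
  else r
termination_by (r + 1 - l).toNat
decreasing_by
  · have h2 : PySem.Int.floordiv (r - l) 2 = (r - l) / 2 :=
      PySem.Int.floordiv_eq_ediv_of_pos (by norm_num)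
    simp only [h2] at *; omega
  · have h2 : PySem.Int.floordiv (r - l) 2 = (r - l) / 2 :=
      PySem.Int.floordiv_eq_ediv_of_pos (by norm_num)
    simp only [h2] at *; omega

def answer (T : List Int) (M : Int) : Int := answerLoop T M 1 1000000000

-- ===== PORT B =====
-- literal port of Source B: the for-loop over (j, t) = enumerate(s, 1) with running prefix sum
-- 'j == len(s) or s[j] <= h' of Source B: peek at the next element of the suffix
def altPeek (h : Int) : List Int → Bool
  | [] => true
  | u :: _ => decide (u ≤ h)

def altLoop (M : Int) : List Int → Int → Int → Option Int → Option Int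
  | [], _, _, best => best
  | t :: rest, j, pre, best =>
    let pre' := pre + t
    let h := PySem.Int.floordiv (pre' - M) j
    let ok : Bool := decide (h < t) && altPeek h rest
    let best' := if ok then (match best with
                             | none => some h
                             | some b => if b < h then some h else some b)
                 else best
    altLoop M rest (j + 1) pre' best'

def answer_alt (T : List Int) (M : Int) : Int :=
  if M ≤ 0 then 1000000000
  else
    let s := PySem.List.sorted T (fun x => x) true
    match altLoop M s 1 0 none with
    | none => 0
    | some b => if b < 1 then 0 else min b 1000000000

-- ===== PRECONDITION & SPEC =====
def Spec_answer (T : List Int) (M : Int) (out : Int) : Prop := out = answer_alt T M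
instance (T : List Int) (M : Int) (out : Int) : Decidable (Spec_answer T M out) := by unfold Spec_answer; infer_instance

-- ===== CLAIM (what is proved, stated in full; the proofs are below) =====
def Claim_equal_answer : Prop := ∀ (T : List Int) (M : Int), Dom_answer T M → Spec_answer T M (answer T M)

-- ===== LEMMAS AND PROOFS =====

def pvWoods (T : List Int) (m : Int) : Int :=
  T.foldl (fun acc t => if m < t then acc + (t - m) else acc) 0

lemma pvWoods_foldl_aux (m : Int) : ∀ (T : List Int) (a : Int),
    T.foldl (fun acc t => if m < t then acc + (t - m) else acc) a
      = a + (T.map (fun t => if m < t then t - m else 0)).sum := by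
  intro T
  induction T with
  | nil => intro a; simp
  | cons t rest ih =>
    intro a
    simp only [List.foldl_cons, List.map_cons, List.sum_cons, ih]
    split_ifs <;> ring

lemma pvWoods_eq (T : List Int) (m : Int) :
    pvWoods T m = (T.map (fun t => if m < t then t - m else 0)).sum := by
  simpa using pvWoods_foldl_aux m T 0

lemma pvWoods_nonneg (T : List Int) (m : Int) : 0 ≤ pvWoods T m := by
  rw [pvWoods_eq]
  apply List.sum_nonneg
  intro x hx
  simp only [List.mem_map] at hx
  obtain ⟨t, _, rfl⟩ := hx
  split_ifs <;> omega

lemma pvWoods_anti (T : List Int) {m m' : Int} (h : m ≤ m') :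
    pvWoods T m' ≤ pvWoods T m := by
  rw [pvWoods_eq, pvWoods_eq]
  apply List.sum_le_sum
  intro t _
  split_ifs <;> omega

lemma pvWoods_perm {T T' : List Int} (hp : T.Perm T') (m : Int) :
    pvWoods T m = pvWoods T' m := by
  rw [pvWoods_eq, pvWoods_eq]
  exact (hp.map _).sum_eq

lemma pvWoods_zero {T : List Int} {m : Int} (h : ∀ t ∈ T, t ≤ m) : pvWoods T m = 0 := by
  rw [pvWoods_eq]
  apply List.sum_eq_zero
  intro x hx
  simp only [List.mem_map] at hx
  obtain ⟨t, ht, rfl⟩ := hx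
  have := h t ht
  split_ifs <;> omega

lemma pvWoods_append (A B : List Int) (m : Int) :
    pvWoods (A ++ B) m = pvWoods A m + pvWoods B m := by
  rw [pvWoods_eq, pvWoods_eq, pvWoods_eq, List.map_append, List.sum_append]

lemma pvWoods_ge_sum (T : List Int) (m : Int) :
    T.sum - (T.length : Int) * m ≤ pvWoods T m := by
  rw [pvWoods_eq]
  induction T with
  | nil => simp
  | cons t rest ih =>
    simp only [List.sum_cons, List.length_cons, List.map_cons, List.sum_cons]
    push_cast
    have : (if m < t then t - m else 0) ≥ t - m := by split_ifs <;> omega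
    linarith

lemma pvWoods_all_gt {T : List Int} {m : Int} (h : ∀ t ∈ T, m < t) :
    pvWoods T m = T.sum - (T.length : Int) * m := by
  rw [pvWoods_eq]
  induction T with
  | nil => simp
  | cons t rest ih =>
    have ht := h t (List.mem_cons_self ..)
    simp only [List.map_cons, List.sum_cons, List.sum_cons, List.length_cons,
      ih (fun u hu => h u (List.mem_cons_of_mem _ hu)), if_pos ht]
    push_cast; ring

lemma pvWoods_split (s : List Int) (m : Int) (j : Nat) (hj : j ≤ s.length)
    (h1 : ∀ t ∈ s.take j, m < t) (h2 : ∀ t ∈ s.drop j, t ≤ m) :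
    pvWoods s m = (s.take j).sum - (j : Int) * m := by
  conv_lhs => rw [← List.take_append_drop j s]
  rw [pvWoods_append, pvWoods_zero h2, pvWoods_all_gt h1, List.length_take]
  have : min j s.length = j := by omega
  rw [this]; ring

-- A-side: characterization of the binary search result
lemma answerLoop_char (T : List Int) (M : Int) :
    ∀ (n : Nat) (l r : Int), n = (r + 1 - l).toNat → l ≤ r + 1 →
    (∀ m, 1 ≤ m → m < l → M ≤ pvWoods T m) →
    (∀ m, r < m → m ≤ 1000000000 → ¬ M ≤ pvWoods T m) →
    (∀ m, 1 ≤ m → m ≤ answerLoop T M l r → M ≤ pvWoods T m) ∧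
    (∀ m, answerLoop T M l r < m → m ≤ 1000000000 → ¬ M ≤ pvWoods T m) ∧
    l - 1 ≤ answerLoop T M l r ∧ answerLoop T M l r ≤ r := by
  intro n
  induction n using Nat.strong_induction_on with
  | _ n ih =>
    intro l r hn hlr h1 h2
    rw [answerLoop]
    by_cases hle : l ≤ r
    · simp only [dif_pos hle]
      have h2eq : PySem.Int.floordiv (r - l) 2 = (r - l) / 2 :=
        PySem.Int.floordiv_eq_ediv_of_pos (by norm_num)
      set m := l + PySem.Int.floordiv (r - l) 2 with hm
      have hmb : l ≤ m ∧ m ≤ r := by rw [hm, h2eq]; omega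
      have hw : T.foldl (fun acc t => if m < t then acc + (t - m) else acc) 0 = pvWoods T m := rfl
      rw [hw]
      by_cases hwM : pvWoods T m < M
      · simp only [if_pos hwM]
        obtain ⟨c1, c2, c3, c4⟩ := ih ((m - 1) + 1 - l).toNat (by rw [hm, h2eq] at *; omega)
          l (m - 1) rfl (by omega) h1
          (by intro m' hm' hm'2 hgood
              have : pvWoods T m' ≤ pvWoods T m := pvWoods_anti T (by omega)
              omega)
        exact ⟨c1, c2, c3, by omega⟩
      · simp only [if_neg hwM]
        obtain ⟨c1, c2, c3, c4⟩ := ih (r + 1 - (m + 1)).toNat (by rw [hm, h2eq] at *; omega)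
          (m + 1) r rfl (by omega)
          (by intro m' hm' hm'2
              have : pvWoods T m ≤ pvWoods T m' := pvWoods_anti T (by omega)
              omega) h2
        exact ⟨c1, c2, by omega, c4⟩
    · simp only [dif_neg hle]
      have : l = r + 1 := by omega
      refine ⟨fun m hm1 hm2 => h1 m hm1 (by omega), fun m hm1 hm2 => h2 m hm1 hm2, by omega, by omega⟩

lemma answer_char (T : List Int) (M : Int) :
    (∀ m, 1 ≤ m → m ≤ answer T M → M ≤ pvWoods T m) ∧
    (∀ m, answer T M < m → m ≤ 1000000000 → ¬ M ≤ pvWoods T m) ∧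
    0 ≤ answer T M ∧ answer T M ≤ 1000000000 := by
  have := answerLoop_char T M ((1000000000 : Int) + 1 - 1).toNat 1 1000000000 rfl
    (by norm_num) (by intro m h1 h2; omega) (by intro m h1 h2; omega)
  exact ⟨this.1, this.2.1, by have := this.2.2; unfold answer; omega,
    by have := this.2.2; unfold answer; omega⟩

-- uniqueness of the characterization
lemma char_unique (P : Int → Prop) (a b : Int)
    (ha3 : ∀ m, 1 ≤ m → m ≤ a → P m) (ha4 : ∀ m, a < m → m ≤ 1000000000 → ¬ P m)
    (hb3 : ∀ m, 1 ≤ m → m ≤ b → P m) (hb4 : ∀ m, b < m → m ≤ 1000000000 → ¬ P m)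
    (ha1 : 0 ≤ a) (ha2 : a ≤ 1000000000) (hb1 : 0 ≤ b) (hb2 : b ≤ 1000000000) :
    a = b := by
  rcases lt_trichotomy a b with h | h | h
  · exact absurd (hb3 (a + 1) (by omega) (by omega)) (ha4 (a + 1) (by omega) (by omega))
  · exact h
  · exact absurd (ha3 (b + 1) (by omega) (by omega)) (hb4 (b + 1) (by omega) (by omega))

-- existence of a maximal good point between a good point and a bad one
lemma pvMaxExists (P : Int → Prop) [DecidablePred P] :
    ∀ (n : Nat) (a b : Int), n = (b - a).toNat → a ≤ b → P a → ¬ P b →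
    ∃ x, a ≤ x ∧ x < b ∧ P x ∧ ¬ P (x + 1) := by
  intro n
  induction n using Nat.strong_induction_on with
  | _ n ih =>
    intro a b hn hab hPa hPb
    have hlt : a < b := lt_of_le_of_ne hab (by rintro rfl; exact hPb hPa)
    by_cases h : P (a + 1)
    · obtain ⟨x, hx1, hx2, hx3, hx4⟩ :=
        ih (b - (a + 1)).toNat (by omega) (a + 1) b rfl (by omega) h hPb
      exact ⟨x, by omega, hx2, hx3, hx4⟩
    · exact ⟨a, le_refl a, hlt, hPa, h⟩

-- descending sorted list: split point for any threshold
lemma desc_split (s : List Int) (hpw : s.Pairwise (fun a b => b ≤ a)) (m : Int) :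
    ∃ j : Nat, j ≤ s.length ∧ (∀ t ∈ s.take j, m < t) ∧ (∀ t ∈ s.drop j, t ≤ m) := by
  induction s with
  | nil => exact ⟨0, by simp, by simp, by simp⟩
  | cons t rest ih =>
    rw [List.pairwise_cons] at hpw
    by_cases hmt : m < t
    · obtain ⟨j, hj1, hj2, hj3⟩ := ih hpw.2
      refine ⟨j + 1, by simp; omega, ?_, ?_⟩
      · intro u hu
        rw [List.take_succ_cons] at hu
        rcases List.mem_cons.mp hu with rfl | hu
        · exact hmt
        · exact hj2 u hu
      · intro u hu
        rw [List.drop_succ_cons] at hu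
        exact hj3 u hu
    · refine ⟨0, by simp, by simp, ?_⟩
      intro u hu
      simp only [List.drop_zero] at hu
      rcases List.mem_cons.mp hu with rfl | hu
      · omega
      · have := hpw.1 u hu; omega

lemma desc_getElem_le {s : List Int} (hpw : s.Pairwise (fun a b => b ≤ a))
    {p q : Nat} (hpq : p ≤ q) (hq : q < s.length) : s[q] ≤ s[p]'(by omega) := by
  rcases Nat.lt_or_ge p q with h | h
  · exact List.pairwise_iff_getElem.mp hpw p q (by omega) hq h
  · have : p = q := by omega
    subst this; exact le_refl _

-- B-side candidate and validity condition
def pvCand (s : List Int) (M : Int) (i : Nat) : Int :=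
  PySem.Int.floordiv ((s.take (i + 1)).sum - M) ((i : Int) + 1)

def pvCond (s : List Int) (M : Int) (i : Nat) : Prop :=
  pvCand s M i < s.getD i 0 ∧ (i + 1 = s.length ∨ s.getD (i + 1) 0 ≤ pvCand s M i)

-- a valid candidate collects at least M wood
lemma cond_good (s : List Int) (M : Int) (hpw : s.Pairwise (fun a b => b ≤ a))
    (i : Nat) (hi : i < s.length) (hc : pvCond s M i) :
    M ≤ pvWoods s (pvCand s M i) := by
  set h := pvCand s M i with hh
  have hgd : s.getD i 0 = s[i] := List.getD_eq_getElem s 0 hi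
  have h1 : ∀ t ∈ s.take (i + 1), h < t := by
    intro t ht
    obtain ⟨p, hp, rfl⟩ := List.mem_iff_getElem.mp ht
    rw [List.length_take] at hp
    have hp2 : p ≤ i := by omega
    have := desc_getElem_le hpw hp2 hi
    rw [List.getElem_take]
    have := hc.1
    rw [hgd] at this
    omega
  have h2 : ∀ t ∈ s.drop (i + 1), t ≤ h := by
    intro t ht
    rcases hc.2 with heq | hle
    · rw [List.drop_eq_nil_of_le (by omega)] at ht
      simp at ht
    · obtain ⟨q, hq, rfl⟩ := List.mem_iff_getElem.mp ht
      rw [List.length_drop] at hq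
      rw [List.getElem_drop]
      have hi1 : i + 1 < s.length := by omega
      have hgd1 : s.getD (i + 1) 0 = s[i + 1] := List.getD_eq_getElem s 0 hi1
      have := desc_getElem_le hpw (show i + 1 ≤ i + 1 + q by omega) (by omega)
      rw [hgd1] at hle
      omega
  have hsplit := pvWoods_split s h (i + 1) (by omega) h1 h2
  have hfd : h * ((i : Int) + 1) ≤ (s.take (i + 1)).sum - M := by
    have : h ≤ PySem.Int.floordiv ((s.take (i + 1)).sum - M) ((i : Int) + 1) := le_of_eq hh
    rwa [PySem.Int.le_floordiv_iff_mul_le (by omega)] at this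
  rw [hsplit]
  push_cast
  nlinarith [hfd]

-- a maximal good height is a valid candidate
lemma good_max_cand (s : List Int) (M : Int) (hpw : s.Pairwise (fun a b => b ≤ a))
    (hM : 0 < M) (h : Int) (hg : M ≤ pvWoods s h) (hb : ¬ M ≤ pvWoods s (h + 1)) :
    ∃ i, i < s.length ∧ pvCond s M i ∧ pvCand s M i = h := by
  obtain ⟨j, hj1, hj2, hj3⟩ := desc_split s hpw h
  have hj0 : 1 ≤ j := by
    by_contra hj
    have : j = 0 := by omega
    subst this
    have := pvWoods_zero (by simpa using hj3)
    omega
  set S := (s.take j).sum with hS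
  have hsplit : pvWoods s h = S - (j : Int) * h := pvWoods_split s h j hj1 hj2 hj3
  have hup : S - (j : Int) * (h + 1) < M := by
    have hlow : pvWoods (s.take j) (h + 1) ≤ pvWoods s (h + 1) := by
      conv_rhs => rw [← List.take_append_drop j s]
      rw [pvWoods_append]
      have := pvWoods_nonneg (s.drop j) (h + 1)
      omega
    have hge : S - ((s.take j).length : Int) * (h + 1) ≤ pvWoods (s.take j) (h + 1) :=
      pvWoods_ge_sum (s.take j) (h + 1)
    rw [List.length_take] at hge
    have hmin : min j s.length = j := by omega
    rw [hmin] at hge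
    omega
  have hj1' : j - 1 + 1 = j := by omega
  have hcand : pvCand s M (j - 1) = h := by
    unfold pvCand
    rw [hj1']
    rw [PySem.Int.floordiv_eq_iff_of_pos (by omega)]
    have hcj : ((j - 1 : Nat) : Int) + 1 = (j : Int) := by omega
    rw [hcj]
    constructor
    · nlinarith [hsplit, hg]
    · nlinarith [hup]
  refine ⟨j - 1, by omega, ⟨?_, ?_⟩, hcand⟩
  · rw [hcand]
    have him : j - 1 < s.length := by omega
    have hgd : s.getD (j - 1) 0 = s[j - 1] := List.getD_eq_getElem s 0 him
    rw [hgd]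
    have hmem : s[j - 1] ∈ s.take j := by
      rw [List.mem_iff_getElem]
      refine ⟨j - 1, by rw [List.length_take]; omega, ?_⟩
      rw [List.getElem_take]
    exact hj2 _ hmem
  · rw [hj1', hcand]
    rcases Nat.lt_or_ge j s.length with hlt | hge
    · right
      have hgd : s.getD j 0 = s[j] := List.getD_eq_getElem s 0 hlt
      rw [hgd]
      have hmem : s[j] ∈ s.drop j := by
        rw [List.mem_iff_getElem]
        refine ⟨0, by rw [List.length_drop]; omega, ?_⟩
        simp
      exact hj3 _ hmem
    · left; omega

-- invariant of altLoop on the suffix starting at position k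
lemma altLoop_spec (M : Int) (s : List Int) :
    ∀ (rem : List Int) (k : Nat) (best : Option Int), rem = s.drop k →
    (∀ b0, best = some b0 →
      ∃ b, altLoop M rem ((k : Int) + 1) ((s.take k).sum) best = some b ∧ b0 ≤ b) ∧
    (∀ i, k ≤ i → i < s.length → pvCond s M i →
      ∃ b, altLoop M rem ((k : Int) + 1) ((s.take k).sum) best = some b ∧ pvCand s M i ≤ b) ∧
    (∀ b, altLoop M rem ((k : Int) + 1) ((s.take k).sum) best = some b →
      best = some b ∨ ∃ i, k ≤ i ∧ i < s.length ∧ pvCond s M i ∧ b = pvCand s M i) := by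
  intro rem
  induction rem with
  | nil =>
    intro k best hrem
    have hlen : s.length ≤ k := by
      have := congrArg List.length hrem
      simp [List.length_drop] at this
      omega
    refine ⟨fun b0 hb0 => ⟨b0, by simp [altLoop, hb0], le_refl _⟩,
      fun i hi1 hi2 _ => absurd hi2 (by omega), fun b hb => Or.inl (by simpa [altLoop] using hb)⟩
  | cons t rest ih =>
    intro k best hrem
    have hk : k < s.length := by
      by_contra hk
      rw [List.drop_eq_nil_of_le (by omega)] at hrem
      exact List.cons_ne_nil t rest hrem
    have ht : t = s[k] := by
      have h1 : (s.drop k)[0]? = some t := by rw [← hrem]; rfl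
      rw [List.getElem?_drop] at h1
      rw [Nat.add_zero, List.getElem?_eq_getElem hk] at h1
      exact (Option.some.inj h1).symm
    have hrest : rest = s.drop (k + 1) := by
      have h1 : (t :: rest).drop 1 = (s.drop k).drop 1 := by rw [hrem]
      simpa [List.drop_drop, Nat.add_comm] using h1
    have hpre : (s.take k).sum + t = (s.take (k + 1)).sum := by
      rw [List.take_add_one]
      have : s[k]? = some t := by rw [List.getElem?_eq_getElem hk, ht]
      rw [this]
      simp
    -- the computed h is the candidate at index k
    have hcand : PySem.Int.floordiv ((s.take k).sum + t - M) ((k : Int) + 1)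
        = pvCand s M k := by
      unfold pvCand
      rw [hpre]
    -- the ok test is pvCond s M k
    have hok : ((decide (PySem.Int.floordiv ((s.take k).sum + t - M) ((k : Int) + 1) < t)
        && altPeek (PySem.Int.floordiv ((s.take k).sum + t - M) ((k : Int) + 1)) rest) = true)
        ↔ pvCond s M k := by
      rw [hcand]
      unfold pvCond
      have hgd : s.getD k 0 = s[k] := List.getD_eq_getElem s 0 hk
      cases hr : rest with
      | nil =>
        have : s.length = k + 1 := by
          rw [hr] at hrest
          have := congrArg List.length hrest
          simp [List.length_drop] at this
          omega
        simp [altPeek, List.getD, ht, this]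
      | cons u rest' =>
        have hk1 : k + 1 < s.length := by
          rw [hr] at hrest
          by_contra hc
          rw [List.drop_eq_nil_of_le (by omega)] at hrest
          exact List.cons_ne_nil u rest' hrest
        have hu : u = s[k + 1] := by
          have h1 : (s.drop (k + 1))[0]? = some u := by rw [← hrest, hr]; rfl
          rw [List.getElem?_drop] at h1
          rw [Nat.add_zero, List.getElem?_eq_getElem hk1] at h1
          exact (Option.some.inj h1).symm
        have hne : k + 1 ≠ s.length := by omega
        simp [altPeek, List.getD, List.getElem?_eq_getElem hk,
          List.getElem?_eq_getElem hk1, ht, hu, hne]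
    -- unfold one step of altLoop
    have hstep : ∀ best, altLoop M (t :: rest) ((k : Int) + 1) ((s.take k).sum) best
        = altLoop M rest ((k : Int) + 1 + 1) ((s.take k).sum + t)
            (if (decide (PySem.Int.floordiv ((s.take k).sum + t - M) ((k : Int) + 1) < t)
                && altPeek (PySem.Int.floordiv ((s.take k).sum + t - M) ((k : Int) + 1)) rest)
             then (match best with
                   | none => some (PySem.Int.floordiv ((s.take k).sum + t - M) ((k : Int) + 1))
                   | some b => if b < PySem.Int.floordiv ((s.take k).sum + t - M) ((k : Int) + 1)
                               then some (PySem.Int.floordiv ((s.take k).sum + t - M) ((k : Int) + 1))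
                               else some b)
             else best) := by
      intro best; rfl
    have hcast : ((k : Int) + 1 + 1) = (((k + 1 : Nat) : Int) + 1) := by push_cast; ring
    have ihk := fun best => ih (k + 1) best hrest
    -- helper to rewrite IH's loop call to our shape
    have hloop : ∀ best, altLoop M rest ((k : Int) + 1 + 1) ((s.take k).sum + t) best
        = altLoop M rest (((k + 1 : Nat) : Int) + 1) ((s.take (k + 1)).sum) best := by
      intro best; rw [hcast, hpre]
    by_cases hcond : pvCond s M k
    · have hokT := hok.mpr hcond
      set h := PySem.Int.floordiv ((s.take k).sum + t - M) ((k : Int) + 1) with hhdef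
      have hbest' : (if (decide (h < t) && altPeek h rest)
          then (match best with
                | none => some h
                | some b => if b < h then some h else some b)
          else best)
          = (match best with
             | none => some h
             | some b => if b < h then some h else some b) := by
        rw [if_pos hokT]
      have upd_none : (match (none : Option Int) with
          | none => some h
          | some b => if b < h then some h else some b) = some h := rfl
      have upd_some : ∀ b0 : Int, (match (some b0 : Option Int) with
          | none => some h
          | some b => if b < h then some h else some b)
          = if b0 < h then some h else some b0 := fun _ => rfl
      refine ⟨?_, ?_, ?_⟩
      · intro b0 hb0
        subst hb0
        rw [hstep, hbest', upd_some, hloop]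
        by_cases hc : b0 < h
        · rw [if_pos hc]
          rcases (ihk _).1 h rfl with ⟨b, hb, hle⟩
          exact ⟨b, hb, by omega⟩
        · rw [if_neg hc]
          exact (ihk _).1 b0 rfl
      · intro i hi1 hi2 hci
        rw [hstep, hbest', hloop]
        rcases Nat.eq_or_lt_of_le hi1 with rfl | hlt
        · -- i = k : the candidate just considered
          have hch : pvCand s M k = h := hcand.symm
          cases best with
          | none =>
            rw [upd_none]
            rcases (ihk _).1 h rfl with ⟨b, hb, hle⟩
            exact ⟨b, hb, by rw [hch]; exact hle⟩
          | some b0 =>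
            rw [upd_some]
            by_cases hc : b0 < h
            · rw [if_pos hc]
              rcases (ihk _).1 h rfl with ⟨b, hb, hle⟩
              exact ⟨b, hb, by rw [hch]; exact hle⟩
            · rw [if_neg hc]
              rcases (ihk _).1 b0 rfl with ⟨b, hb, hle⟩
              exact ⟨b, hb, by rw [hch]; omega⟩
        · exact (ihk _).2.1 i (by omega) hi2 hci
      · intro b hb
        rw [hstep, hbest', hloop] at hb
        cases best with
        | none =>
          rw [upd_none] at hb
          rcases (ihk _).2.2 b hb with hb' | ⟨i, hi1, hi2, hi3, hi4⟩
          · right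
            exact ⟨k, le_refl _, hk, hcond, by rw [← Option.some.inj hb']; exact hcand⟩
          · right; exact ⟨i, by omega, hi2, hi3, hi4⟩
        | some b0 =>
          rw [upd_some] at hb
          by_cases hc : b0 < h
          · rw [if_pos hc] at hb
            rcases (ihk _).2.2 b hb with hb' | ⟨i, hi1, hi2, hi3, hi4⟩
            · right
              exact ⟨k, le_refl _, hk, hcond, by rw [← Option.some.inj hb']; exact hcand⟩
            · right; exact ⟨i, by omega, hi2, hi3, hi4⟩
          · rw [if_neg hc] at hb
            rcases (ihk _).2.2 b hb with hb' | ⟨i, hi1, hi2, hi3, hi4⟩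
            · left; exact hb'
            · right; exact ⟨i, by omega, hi2, hi3, hi4⟩
    · have hokF : ¬ ((decide (PySem.Int.floordiv ((s.take k).sum + t - M) ((k : Int) + 1) < t)
          && altPeek (PySem.Int.floordiv ((s.take k).sum + t - M) ((k : Int) + 1)) rest) = true) := by
        rw [hok]; exact hcond
      have hbest' : (if (decide (PySem.Int.floordiv ((s.take k).sum + t - M) ((k : Int) + 1) < t)
          && altPeek (PySem.Int.floordiv ((s.take k).sum + t - M) ((k : Int) + 1)) rest)
          then (match best with
                | none => some (PySem.Int.floordiv ((s.take k).sum + t - M) ((k : Int) + 1))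
                | some b => if b < PySem.Int.floordiv ((s.take k).sum + t - M) ((k : Int) + 1)
                            then some (PySem.Int.floordiv ((s.take k).sum + t - M) ((k : Int) + 1))
                            else some b)
          else best) = best := by
        rw [if_neg hokF]
      refine ⟨?_, ?_, ?_⟩
      · intro b0 hb0
        rw [hstep, hbest', hloop]
        exact (ihk best).1 b0 hb0
      · intro i hi1 hi2 hci
        rw [hstep, hbest', hloop]
        rcases Nat.eq_or_lt_of_le hi1 with rfl | hlt
        · exact absurd hci hcond
        · exact (ihk best).2.1 i (by omega) hi2 hci
      · intro b hb
        rw [hstep, hbest', hloop] at hb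
        rcases (ihk best).2.2 b hb with hb' | ⟨i, hi1, hi2, hi3, hi4⟩
        · left; exact hb'
        · right; exact ⟨i, by omega, hi2, hi3, hi4⟩

-- B-side: the same characterization
lemma alt_char (T : List Int) (M : Int) :
    (∀ m, 1 ≤ m → m ≤ answer_alt T M → M ≤ pvWoods T m) ∧
    (∀ m, answer_alt T M < m → m ≤ 1000000000 → ¬ M ≤ pvWoods T m) ∧
    0 ≤ answer_alt T M ∧ answer_alt T M ≤ 1000000000 := by
  by_cases hM : M ≤ 0
  · have hres : answer_alt T M = 1000000000 := by simp [answer_alt, hM]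
    rw [hres]
    refine ⟨fun m _ _ => le_trans hM (pvWoods_nonneg T m), fun m h1 h2 => by omega,
      by norm_num, le_refl _⟩
  · have hM' : 0 < M := by omega
    set s := PySem.List.sorted T (fun x => x) true with hs
    have hperm : s.Perm T := PySem.List.sorted_perm ..
    have hpw : s.Pairwise (fun a b => b ≤ a) := by
      have := PySem.List.sorted_pairwise_rev (xs := T) (key := fun x => x)
      simpa using this
    have hwT : ∀ m, pvWoods T m = pvWoods s m := fun m => (pvWoods_perm hperm m).symm
    have hspec := altLoop_spec M s s 0 none (by simp)
    simp only [List.take_zero, List.sum_nil, Nat.cast_zero, zero_add] at hspec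
    -- every value the loop returns is good
    have hGOOD : ∀ b, altLoop M s 1 0 none = some b → M ≤ pvWoods s b := by
      intro b hb
      rcases hspec.2.2 b hb with h | ⟨i, _, hi2, hi3, hi4⟩
      · exact absurd h (by simp)
      · rw [hi4]; exact cond_good s M hpw i hi2 hi3
    -- every good height is dominated by the loop's result
    have hMAX : ∀ h, M ≤ pvWoods s h → ∃ b, altLoop M s 1 0 none = some b ∧ h ≤ b := by
      intro h hg
      -- s is nonempty and its head is strictly above h and bad
      obtain ⟨t0, rest, hcons⟩ : ∃ t0 rest, s = t0 :: rest := by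
        cases hs' : s with
        | nil =>
          exfalso
          rw [hs'] at hg
          rw [pvWoods_zero (by simp)] at hg
          omega
        | cons a b => exact ⟨a, b, rfl⟩
      have hall : ∀ u ∈ s, u ≤ t0 := by
        intro u hu
        rw [hcons] at hu hpw
        rw [List.pairwise_cons] at hpw
        rcases List.mem_cons.mp hu with rfl | hu
        · exact le_refl _
        · exact hpw.1 u hu
      have hbad : ¬ M ≤ pvWoods s t0 := by
        rw [pvWoods_zero hall]; omega
      have hlt : h < t0 := by
        by_contra hc
        have : ∀ u ∈ s, u ≤ h := fun u hu => le_trans (hall u hu) (by omega)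
        rw [pvWoods_zero this] at hg; omega
      obtain ⟨x, hx1, hx2, hx3, hx4⟩ :=
        pvMaxExists (fun m => M ≤ pvWoods s m) (t0 - h).toNat h t0 rfl (by omega) hg hbad
      obtain ⟨i, hi1, hi2, hi3⟩ := good_max_cand s M hpw hM' x hx3 hx4
      rcases hspec.2.1 i (Nat.zero_le i) hi1 hi2 with ⟨b, hb, hble⟩
      exact ⟨b, hb, by rw [hi3] at hble; omega⟩
    have hres : answer_alt T M = (match altLoop M s 1 0 none with
        | none => 0
        | some b => if b < 1 then 0 else min b 1000000000) := by
      simp only [answer_alt, if_neg hM]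
      rw [← hs]
    cases hloop : altLoop M s 1 0 none with
    | none =>
      have hres0 : answer_alt T M = 0 := by rw [hres, hloop]
      rw [hres0]
      refine ⟨fun m h1 h2 => by omega, fun m h1 h2 hg => ?_, by norm_num, by norm_num⟩
      rw [hwT] at hg
      rcases hMAX m hg with ⟨b, hb, _⟩
      rw [hloop] at hb; simp at hb
    | some b =>
      by_cases hb1 : b < 1
      · have hres0 : answer_alt T M = 0 := by rw [hres, hloop]; show (if b < 1 then (0:Int) else min b 1000000000) = 0; rw [if_pos hb1]
        rw [hres0]
        refine ⟨fun m h1 h2 => by omega, fun m h1 h2 hg => ?_, by norm_num, by norm_num⟩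
        rw [hwT] at hg
        rcases hMAX m hg with ⟨b', hb', hle⟩
        rw [hloop] at hb'
        injection hb' with hb'
        omega
      · have hres0 : answer_alt T M = min b 1000000000 := by rw [hres, hloop]; show (if b < 1 then (0:Int) else min b 1000000000) = min b 1000000000; rw [if_neg hb1]
        rw [hres0]
        have hgb : M ≤ pvWoods s b := hGOOD b hloop
        refine ⟨fun m h1 h2 => ?_, fun m h1 h2 hg => ?_, by omega, by omega⟩
        · rw [hwT]
          have hmb : m ≤ b := le_trans h2 (min_le_left _ _)
          exact le_trans hgb (pvWoods_anti s hmb)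
        · rw [hwT] at hg
          rcases hMAX m hg with ⟨b', hb', hle⟩
          rw [hloop] at hb'
          injection hb' with hb'
          subst hb'
          rcases le_or_gt b 1000000000 with hble | hbgt
          · rw [min_eq_left hble] at h1; omega
          · rw [min_eq_right (by omega)] at h1; omega

-- ===== VERDICT (by name: the statement is the Claim_ definition above) =====
theorem answer_spec : Claim_equal_answer := by
  intro T M _
  unfold Spec_answer
  obtain ⟨ha3, ha4, ha1, ha2⟩ := answer_char T M
  obtain ⟨hb3, hb4, hb1, hb2⟩ := alt_char T M
  exact char_unique (fun m => M ≤ pvWoods T m) (answer T M) (answer_alt T M)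
    ha3 ha4 hb3 hb4 ha1 ha2 hb1 hb2
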